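-- pv_equiv track=rewrite | github.com/tmuehlen80/graph_coverage | graph_creator/MapGraph.py | _create_truncated_labels
-- ===== SOURCE A (Python) =====
-- def _create_truncated_labels(node_ids):
--     """
--     Create truncated labels by removing common leading characters.
--
--     Args:
--         node_ids: List of node IDs (strings)
--
--     Returns:
--         Dictionary mapping original node IDs to truncated labels
--     """
--     if not node_ids:
--         return {}
--
--     # Convert to strings and find common leading characters
--     str_ids = [str(node_id) for node_id in node_ids]
--
--     # Find the longest common prefix
--     if len(str_ids) == 1:
--         common_prefix = ""
--     else:
--         # Find common prefix by comparing characters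
--         common_prefix = ""
--         min_length = min(len(s) for s in str_ids)
--
--         for i in range(min_length):
--             char = str_ids[0][i]
--             if all(s[i] == char for s in str_ids):
--                 common_prefix += char
--             else:
--                 break
--
--     # Create truncated labels
--     labels = {}
--     for node_id in node_ids:
--         str_id = str(node_id)
--         if str_id.startswith(common_prefix):
--             # Remove common prefix and keep the rest
--             truncated = str_id[len(common_prefix):]
--             # If truncated is empty, keep at least one character
--             if not truncated:
--                 truncated = str_id[-1] if len(str_id) > 0 else str_id
--             labels[node_id] = truncated
--         else:
--             # Fallback: keep original if no common prefix
--             labels[node_id] = str_id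
--
--     return labels
-- ===== SOURCE B (Python) =====
-- def _lcp2(a, b):
--     # longest common prefix of two strings
--     i = 0
--     m = min(len(a), len(b))
--     while i < m and a[i] == b[i]:
--         i += 1
--     return a[:i]
--
--
-- def _create_truncated_labels(node_ids):
--     """Same mapping as A, but the common prefix is a pairwise fold of a
--     binary LCP over the strings instead of a column-by-column scan."""
--     if not node_ids:
--         return {}
--     str_ids = [str(n) for n in node_ids]
--     if len(str_ids) == 1:
--         common_prefix = ""
--     else:
--         common_prefix = str_ids[0]
--         for s in str_ids[1:]:
--             common_prefix = _lcp2(common_prefix, s)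
--     k = len(common_prefix)
--     return {nid: (str(nid)[k:] or str(nid)[-1:] or str(nid)) for nid in node_ids}
-- ===== Notes on version B (the rewrite author's own statement) =====
-- stated objective: alternative
-- what changed: The common prefix is computed by folding a binary two-string LCP pairwise over the list (and each label is built directly, the dead startswith fallback dropped) instead of A's column-by-column index scan with an inner all()-pass over every string.
import Mathlib
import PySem

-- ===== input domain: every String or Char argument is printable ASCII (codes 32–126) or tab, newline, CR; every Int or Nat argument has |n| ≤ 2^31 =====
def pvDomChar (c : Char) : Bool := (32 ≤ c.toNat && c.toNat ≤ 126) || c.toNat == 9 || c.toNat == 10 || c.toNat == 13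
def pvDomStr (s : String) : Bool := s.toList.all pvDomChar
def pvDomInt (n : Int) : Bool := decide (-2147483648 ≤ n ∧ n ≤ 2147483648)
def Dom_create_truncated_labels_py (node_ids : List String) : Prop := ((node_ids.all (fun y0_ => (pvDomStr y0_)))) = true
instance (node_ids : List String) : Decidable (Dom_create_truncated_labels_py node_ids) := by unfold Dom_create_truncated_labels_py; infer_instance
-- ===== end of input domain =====

-- B computes the common prefix as a pairwise fold of a binary LCP over the strings
-- (instead of A's column-by-column scan with an inner all()-pass) and builds each label
-- directly, the startswith fallback being provably dead; objective: alternative.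


-- ===== PORT A =====
-- A's prefix loop: 'for i in range(min_length): char = str_ids[0][i]; if all(s[i] == char for s in str_ids): common_prefix += char else: break'.
-- Indexing uses getD ' ': at every call site i < minLen ≤ length of each string, so the default is never hit (Python's s[i] is in range).
def ctlA_prefixLoop (strs : List (List Char)) (first : List Char) (minLen : Nat) (i : Nat) (cp : List Char) : List Char :=
  if _h : i < minLen then
    let char := first.getD i ' '
    if strs.all (fun s => s.getD i ' ' == char) then
      ctlA_prefixLoop strs first minLen (i + 1) (cp ++ [char])
    else cp
  else cp
termination_by minLen - i

-- port of A (_create_truncated_labels); str(node_id) on a str is the identity, strings carried as List Char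
def create_truncated_labels_py (node_ids : List String) : List (String × String) :=
  if node_ids = [] then []
  else
    let str_ids : List (List Char) := node_ids.map (fun s => s.toList)
    let common_prefix : List Char :=
      if str_ids.length = 1 then []
      else
        -- min(len(s) for s in str_ids): str_ids ≠ [] here, so min? is 'some' and the 0 default is never hit
        let min_length : Nat :=
          match PySem.List.min? (str_ids.map (fun s => (s.length : Int))) (fun v => v) with
          | some v => v.toNat
          | none => 0
        -- str_ids[0]: str_ids ≠ [] here, so headD's default is never hit
        ctlA_prefixLoop str_ids (str_ids.headD []) min_length 0 []
    let labels : PySem.Dict String String :=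
      node_ids.foldl (fun labels node_id =>
        let str_id := node_id.toList
        if PySem.Chars.startswith str_id common_prefix then
          let truncated := PySem.Chars.slice str_id (some (common_prefix.length : Int)) none
          let truncated :=
            if truncated = [] then
              if 0 < str_id.length then
                -- str_id[-1]: in range since 0 < len, so pyGet? is 'some' and the [] default is never hit
                ((PySem.List.pyGet? str_id (-1)).map (fun c => [c])).getD []
              else str_id
            else truncated
          labels.insert node_id (String.ofList truncated)
        else
          labels.insert node_id (String.ofList str_id)) PySem.Dict.empty
    labels.items

-- ===== PORT B =====
-- B's binary LCP: 'i = 0; m = min(len(a), len(b)); while i < m and a[i] == b[i]: i += 1; return a[:i]'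
def ctlB_lcpLen (a b : List Char) (i : Nat) (m : Nat) : Nat :=
  if _h : i < m then
    -- a[i], b[i]: i < m = min of the lengths, so getD's default is never hit
    if a.getD i ' ' == b.getD i ' ' then ctlB_lcpLen a b (i + 1) m else i
  else i
termination_by m - i

def ctlB_lcp2 (a b : List Char) : List Char :=
  a.take (ctlB_lcpLen a b 0 (min a.length b.length))

-- port of B (Source B)
def create_truncated_labels_py_alt (node_ids : List String) : List (String × String) :=
  if node_ids = [] then []
  else
    let str_ids : List (List Char) := node_ids.map (fun s => s.toList)
    let common_prefix : List Char :=
      if str_ids.length = 1 then []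
      else str_ids.tail.foldl ctlB_lcp2 (str_ids.headD [])  -- str_ids[0] / str_ids[1:]: str_ids ≠ [] here
    let k := common_prefix.length
    (node_ids.foldl (fun labels nid =>
        let s := nid.toList
        let t := PySem.Chars.slice s (some (k : Int)) none        -- str(nid)[k:]
        let lab :=
          if t ≠ [] then t
          else
            let u := PySem.Chars.slice s (some (-1)) none          -- str(nid)[-1:]
            if u ≠ [] then u else s
        labels.insert nid (String.ofList lab)) (PySem.Dict.empty : PySem.Dict String String)).items

-- ===== PRECONDITION & SPEC =====
def Spec_create_truncated_labels_py (node_ids : List String) (out : List (String × String)) : Prop := out = create_truncated_labels_py_alt node_ids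
instance (node_ids : List String) (out : List (String × String)) : Decidable (Spec_create_truncated_labels_py node_ids out) := by unfold Spec_create_truncated_labels_py; infer_instance

-- ===== CLAIM (what is proved, stated in full; the proofs are below) =====
def Claim_equal_create_truncated_labels_py : Prop := ∀ (node_ids : List String), Dom_create_truncated_labels_py node_ids → Spec_create_truncated_labels_py node_ids (create_truncated_labels_py node_ids)

-- ===== LEMMAS AND PROOFS =====

-- canonical structural longest-common-prefix of two lists
def lcpC : List Char → List Char → List Char
  | [], _ => []
  | _, [] => []
  | c :: a, d :: b => if c = d then c :: lcpC a b else []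

-- column-wise LCP: reference form of A's loop
def colLcp : List Char → List (List Char) → List Char
  | [], _ => []
  | c :: x', xs => if xs.all (fun s => s.head? == some c) then c :: colLcp x' (xs.map (·.drop 1)) else []

theorem allCongrMem {α : Type} (l : List α) (f g : α → Bool) (h : ∀ x ∈ l, f x = g x) :
    l.all f = l.all g := by
  induction l with
  | nil => rfl
  | cons x t ih =>
      simp only [List.all_cons, h x (by simp)]
      rw [ih (fun y hy => h y (by simp [hy]))]

theorem lcpLen_succ (a b : List Char) (x y : Char) :
    ∀ m i, ctlB_lcpLen (x :: a) (y :: b) (i + 1) (m + 1) = ctlB_lcpLen a b i m + 1 := by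
  intro m i
  induction h : m - i generalizing i with
  | zero =>
      unfold ctlB_lcpLen
      have : ¬ i < m := by omega
      simp [this, show ¬ i + 1 < m + 1 by omega]
  | succ n ih =>
      unfold ctlB_lcpLen
      have hi : i < m := by omega
      simp only [show i + 1 < m + 1 from by omega, hi, dif_pos]
      simp only [List.getD_cons_succ]
      split
      · exact ih (i + 1) (by omega)
      · rfl

theorem lcp2_eq : ∀ a b : List Char, ctlB_lcp2 a b = lcpC a b := by
  intro a
  induction a with
  | nil => intro b; simp [ctlB_lcp2, lcpC]
  | cons c a' ih =>
      intro b
      cases b with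
      | nil => simp [ctlB_lcp2, ctlB_lcpLen, lcpC]
      | cons d b' =>
          simp only [ctlB_lcp2, lcpC, List.length_cons]
          rw [show min (a'.length + 1) (b'.length + 1) = min a'.length b'.length + 1 by omega]
          unfold ctlB_lcpLen
          simp only [Nat.zero_lt_succ, dif_pos, List.getD_cons_zero]
          by_cases hcd : c = d
          · simp only [hcd, beq_self_eq_true, if_true]
            rw [show (0 : Nat) + 1 = 0 + 1 from rfl, lcpLen_succ a' b' d d]
            simp only [List.take_succ_cons]
            rw [← ih b']
            rfl
          · simp [hcd]

theorem colLcp_nil : ∀ x : List Char, colLcp x [] = x := by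
  intro x
  induction x with
  | nil => rfl
  | cons c x' ih => simp [colLcp, ih]

theorem colLcp_absorb : ∀ (x s : List Char) (xs : List (List Char)),
    colLcp x (s :: xs) = colLcp (lcpC x s) xs := by
  intro x
  induction x with
  | nil => intro s xs; rfl
  | cons c x' ih =>
      intro s xs
      cases s with
      | nil =>
          have h1 : lcpC (c :: x') [] = [] := rfl
          rw [h1]
          have h2 : (([] : List Char) :: xs).all (fun s => s.head? == some c) = false := by simp
          simp [colLcp, h2]
      | cons d s' =>
          by_cases hcd : c = d
          · subst hcd
            have hl : lcpC (c :: x') (c :: s') = c :: lcpC x' s' := by simp [lcpC]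
            rw [hl]
            by_cases hall : xs.all (fun s => s.head? == some c) = true
            · have hLHS : colLcp (c :: x') ((c :: s') :: xs) =
                  c :: colLcp x' (s' :: xs.map (·.drop 1)) := by
                simp [colLcp, hall]
              have hRHS : colLcp (c :: lcpC x' s') xs =
                  c :: colLcp (lcpC x' s') (xs.map (·.drop 1)) := by
                simp [colLcp, hall]
              rw [hLHS, hRHS, ih s' (xs.map (·.drop 1))]
            · have hfa : xs.all (fun s => s.head? == some c) = false := by
                simpa using hall
              have hLHS : colLcp (c :: x') ((c :: s') :: xs) = [] := by
                simp [colLcp, hfa]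
              have hRHS : colLcp (c :: lcpC x' s') xs = [] := by
                simp [colLcp, hfa]
              rw [hLHS, hRHS]
          · have hl : lcpC (c :: x') (d :: s') = [] := by simp [lcpC, hcd]
            rw [hl]
            have hLHS : colLcp (c :: x') ((d :: s') :: xs) = [] := by
              simp [colLcp, Ne.symm hcd]
            rw [hLHS]
            rfl

theorem fold_eq_colLcp : ∀ (xs : List (List Char)) (x : List Char),
    xs.foldl lcpC x = colLcp x xs := by
  intro xs
  induction xs with
  | nil => intro x; exact (colLcp_nil x).symm
  | cons s xs ih =>
      intro x
      rw [List.foldl_cons, ih (lcpC x s), colLcp_absorb]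

theorem colLcp_prefix : ∀ (x : List Char) (xs : List (List Char)),
    colLcp x xs <+: x ∧ ∀ s ∈ xs, colLcp x xs <+: s := by
  intro x
  induction x with
  | nil => intro xs; exact ⟨List.nil_prefix, fun s _ => List.nil_prefix⟩
  | cons c x' ih =>
      intro xs
      simp only [colLcp]
      split
      · rename_i hall
        obtain ⟨h1, h2⟩ := ih (xs.map (·.drop 1))
        refine ⟨List.cons_prefix_cons.mpr ⟨rfl, h1⟩, ?_⟩
        intro s hs
        have hhead : s.head? == some c := by
          rw [List.all_eq_true] at hall; exact hall s hs
        cases s with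
        | nil => simp at hhead
        | cons e s' =>
            simp only [List.head?_cons, beq_iff_eq, Option.some.injEq] at hhead
            refine List.cons_prefix_cons.mpr ⟨hhead.symm, ?_⟩
            exact h2 s' (List.mem_map.mpr ⟨e :: s', hs, rfl⟩)
      · exact ⟨List.nil_prefix, fun s _ => List.nil_prefix⟩

-- A's index loop computes the column-wise LCP
theorem aloop_eq_colLcp (x : List Char) (xs : List (List Char)) (m : Nat)
    (hle : ∀ s ∈ x :: xs, m ≤ s.length) (hex : ∃ s ∈ x :: xs, s.length = m) :
    ∀ i cp, i ≤ m →
      ctlA_prefixLoop (x :: xs) x m i cp = cp ++ colLcp (x.drop i) (xs.map (·.drop i)) := by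
  intro i cp hi
  induction h : m - i generalizing i cp with
  | zero =>
      have him : i = m := by omega
      subst him
      unfold ctlA_prefixLoop
      simp only [lt_self_iff_false, dif_neg, not_false_iff]
      obtain ⟨s, hs, hlen⟩ := hex
      cases hs with
      | head =>
          rw [List.drop_of_length_le (by omega)]
          simp [colLcp]
      | tail _ hs' =>
          cases hx : x.drop i with
          | nil => simp [colLcp]
          | cons c xr =>
              simp only [colLcp]
              have hsmem : s.drop i ∈ xs.map (·.drop i) := List.mem_map.mpr ⟨s, hs', rfl⟩
              have hnil : s.drop i = [] := List.drop_of_length_le (by omega)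
              have : ¬ (xs.map (·.drop i)).all (fun t => t.head? == some c) = true := by
                intro hall
                rw [List.all_eq_true] at hall
                have := hall _ hsmem
                rw [hnil] at this
                simp at this
              simp [this]
  | succ n ih =>
      have hlt : i < m := by omega
      have hix : i < x.length := lt_of_lt_of_le hlt (hle x (by simp))
      unfold ctlA_prefixLoop
      simp only [hlt, dif_pos]
      rw [List.getD_eq_getElem x ' ' hix]
      rw [List.drop_eq_getElem_cons hix]
      simp only [colLcp]
      have hcond : ((x :: xs).all (fun s => s.getD i ' ' == x[i])) =
          ((xs.map (·.drop i)).all (fun t => t.head? == some x[i])) := by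
        simp only [List.all_cons, List.getD_eq_getElem x ' ' hix, beq_self_eq_true, Bool.true_and,
          List.all_map]
        apply allCongrMem
        intro s hs
        have his : i < s.length := lt_of_lt_of_le hlt (hle s (by simp [hs]))
        simp [List.head?_drop, List.getElem?_eq_getElem his]
      rw [hcond]
      by_cases hall : ((xs.map (·.drop i)).all (fun t => t.head? == some x[i])) = true
      · simp only [hall, if_pos]
        rw [ih (i + 1) (cp ++ [x[i]]) (by omega) (by omega)]
        simp only [List.map_map, Function.comp_def]
        rw [show (fun s : List Char => (s.drop i).drop 1) = (fun s : List Char => s.drop (i + 1)) by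
          funext s; rw [List.drop_drop]]
        simp
      · simp only [Bool.not_eq_true] at hall
        simp [hall]

-- the per-element label bodies of the two folds agree when cp is a prefix of the string
theorem label_body_eq (cp : List Char) (nid : String) (hpre : cp <+: nid.toList)
    (d : PySem.Dict String String) :
    (let str_id := nid.toList
     if PySem.Chars.startswith str_id cp then
        let truncated := PySem.Chars.slice str_id (some (cp.length : Int)) none
        let truncated :=
          if truncated = [] then
            if 0 < str_id.length then
              ((PySem.List.pyGet? str_id (-1)).map (fun c => [c])).getD []
            else str_id
          else truncated
        d.insert nid (String.ofList truncated)
      else d.insert nid (String.ofList str_id)) =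
    (let s := nid.toList
     let t := PySem.Chars.slice s (some (cp.length : Int)) none
     let lab :=
       if t ≠ [] then t
       else
         let u := PySem.Chars.slice s (some (-1)) none
         if u ≠ [] then u else s
     d.insert nid (String.ofList lab)) := by
  have hsw : PySem.Chars.startswith nid.toList cp = true := (PySem.Chars.startswith_iff _ _).mpr hpre
  simp only [hsw, if_pos]
  have hslice : PySem.Chars.slice nid.toList (some (cp.length : Int)) none = nid.toList.drop cp.length := by
    simp [PySem.Chars.slice_eq_listSlice, PySem.List.slice_from_natCast]
  have hslice1 : PySem.Chars.slice nid.toList (some (-1)) none = nid.toList.drop (nid.toList.length - 1) := by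
    simp [PySem.Chars.slice_eq_listSlice, PySem.List.slice_from_neg_one]
  rw [hslice, hslice1]
  by_cases ht : nid.toList.drop cp.length = []
  · simp only [ht, ne_eq, not_true_eq_false, if_false, ite_not]
    cases hs : nid.toList with
    | nil => simp
    | cons c rest =>
        have hne : nid.toList ≠ [] := by simp [hs]
        rw [← hs]
        have hlast : nid.toList.drop (nid.toList.length - 1) = [nid.toList.getLast hne] :=
          List.drop_length_sub_one hne
        have hget : PySem.List.pyGet? nid.toList (-1) = some (nid.toList.getLast hne) := by
          rw [PySem.List.pyGet?_neg_one, List.getLast?_eq_getLast_of_ne_nil hne]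
        rw [hlast, hget]
        have hposs : 0 < nid.length := by rw [← String.length_toList, hs]; simp
        simp [hposs]
  · simp [ht]

-- the two label folds agree when cp is a prefix of every element
theorem labels_fold_eq (cp : List Char) (l : List String)
    (h : ∀ nid ∈ l, cp <+: nid.toList) :
    (l.foldl (fun labels node_id =>
        let str_id := node_id.toList
        if PySem.Chars.startswith str_id cp then
          let truncated := PySem.Chars.slice str_id (some (cp.length : Int)) none
          let truncated :=
            if truncated = [] then
              if 0 < str_id.length then
                ((PySem.List.pyGet? str_id (-1)).map (fun c => [c])).getD []
              else str_id
            else truncated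
          labels.insert node_id (String.ofList truncated)
        else labels.insert node_id (String.ofList str_id)) (PySem.Dict.empty : PySem.Dict String String)) =
    (l.foldl (fun labels nid =>
        let s := nid.toList
        let t := PySem.Chars.slice s (some (cp.length : Int)) none
        let lab :=
          if t ≠ [] then t
          else
            let u := PySem.Chars.slice s (some (-1)) none
            if u ≠ [] then u else s
        labels.insert nid (String.ofList lab)) (PySem.Dict.empty : PySem.Dict String String)) := by
  apply PySem.List.foldl_congr_mem
  intro d nid hmem
  exact label_body_eq cp nid (h nid hmem) d

-- the common prefixes computed by the two ports coincide (multi-string case)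
theorem prefix_eq (x : List Char) (xs : List (List Char)) :
    (let min_length : Nat :=
        match PySem.List.min? (((x :: xs).map (fun s => (s.length : Int)))) (fun v => v) with
        | some v => v.toNat
        | none => 0
      ctlA_prefixLoop (x :: xs) x min_length 0 []) =
    xs.foldl ctlB_lcp2 x := by
  have hfold : xs.foldl ctlB_lcp2 x = colLcp x xs := by
    rw [show xs.foldl ctlB_lcp2 x = xs.foldl lcpC x by
      apply PySem.List.foldl_congr_mem; intro a s _; exact lcp2_eq a s]
    exact fold_eq_colLcp xs x
  rw [hfold]
  cases hmin : PySem.List.min? (((x :: xs).map (fun s => (s.length : Int)))) (fun v => v) with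
  | none =>
      exact absurd ((PySem.List.min?_eq_none_iff _ _).mp hmin) (by simp)
  | some v =>
      simp only
      have hvmem := PySem.List.min?_mem hmin
      rw [List.mem_map] at hvmem
      obtain ⟨s0, hs0, hv⟩ := hvmem
      have hle : ∀ s ∈ x :: xs, v.toNat ≤ s.length := by
        intro s hs
        have := PySem.List.min?_isMin hmin ((s.length : Int)) (List.mem_map.mpr ⟨s, hs, rfl⟩)
        omega
      have hex : ∃ s ∈ x :: xs, s.length = v.toNat := ⟨s0, hs0, by omega⟩
      have := aloop_eq_colLcp x xs v.toNat hle hex 0 [] (by omega)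
      simpa using this

-- ===== VERDICT (by name: the statement is the Claim_ definition above) =====
theorem create_truncated_labels_py_spec : Claim_equal_create_truncated_labels_py := by
  intro node_ids _hdom
  unfold Spec_create_truncated_labels_py create_truncated_labels_py create_truncated_labels_py_alt
  by_cases hnil : node_ids = []
  · simp [hnil]
  · simp only [hnil, if_false]
    cases hmap : node_ids.map (fun s => s.toList) with
    | nil => exact absurd (List.map_eq_nil_iff.mp hmap) hnil
    | cons x xs =>
        by_cases hone : (x :: xs).length = 1
        · simp only [hone, if_pos]
          have hcp : ∀ nid ∈ node_ids, ([] : List Char) <+: nid.toList :=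
            fun nid _ => List.nil_prefix
          simpa using congrArg PySem.Dict.items (labels_fold_eq [] node_ids hcp)
        · simp only [hone, if_false, List.headD_cons, List.tail_cons]
          rw [prefix_eq x xs]
          refine congrArg PySem.Dict.items (labels_fold_eq (xs.foldl ctlB_lcp2 x) node_ids ?_)
          intro nid hmem
          have hmemx : nid.toList ∈ x :: xs := by
            rw [← hmap]
            exact List.mem_map.mpr ⟨nid, hmem, rfl⟩
          obtain ⟨h1, h2⟩ := colLcp_prefix x xs
          have hfold : xs.foldl ctlB_lcp2 x = colLcp x xs := by
            rw [show xs.foldl ctlB_lcp2 x = xs.foldl lcpC x by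
              apply PySem.List.foldl_congr_mem; intro a s _; exact lcp2_eq a s]
            exact fold_eq_colLcp xs x
          rw [hfold]
          cases hmemx with
          | head => exact h1
          | tail _ hx => exact h2 _ hx
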